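-- pv_equiv track=rewrite | github.com/pypi-data/pypi-mirror-301 | packages/rowfind/rowfind-0.1.0.tar.gz/rowfind-0.1.0/rowfind.py | check
-- ===== SOURCE A (Python) =====
-- def check(coords: tuple[tuple[int, int], ...]) -> bool:
--     """
--     Check if the given coordinates form a row.
--     """
--     Xs, Ys = zip(*coords)
--
--     if len(set(Xs)) == 1 and sorted(Ys) == list(range(min(Ys), max(Ys) + 1)):
--         return True
--
--     if len(set(Ys)) == 1 and sorted(Xs) == list(range(min(Xs), max(Xs) + 1)):
--         return True
--
--     if len(set(x - y for x, y in coords)) == 1 and sorted(Xs) == list(range(min(Xs), max(Xs) + 1)):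
--         return True
--
--     if len(set(x + y for x, y in coords)) == 1 and sorted(Xs) == list(range(min(Xs), max(Xs) + 1)):
--         return True
--
--     return False
-- ===== SOURCE B (Python) =====
-- def check(coords):
--     """
--     Check if the given coordinates form a row.
--     One pass: running min/max plus distinct-count replaces the sorted==range tests.
--     """
--     n = len(coords)
--     minx = maxx = coords[0][0]
--     miny = maxy = coords[0][1]
--     xs = set()
--     ys = set()
--     diffs = set()
--     sums = set()
--     for x, y in coords:
--         minx = min(minx, x)
--         maxx = max(maxx, x)
--         miny = min(miny, y)
--         maxy = max(maxy, y)
--         xs.add(x)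
--         ys.add(y)
--         diffs.add(x - y)
--         sums.add(x + y)
--     contig_x = len(xs) == n and maxx - minx == n - 1
--     contig_y = len(ys) == n and maxy - miny == n - 1
--     return (len(xs) == 1 and contig_y) or \
--         ((len(ys) == 1 or len(diffs) == 1 or len(sums) == 1) and contig_x)
-- ===== Notes on version B (the rewrite author's own statement) =====
-- stated objective: alternative
-- what changed: Replaces the four sorted==range(min,max+1) comparisons with a single pass that maintains running min/max and the four distinct-value sets, then tests contiguity as distinct-count == n and max-min == n-1, so no sorting or range materialisation is done.
import Mathlib
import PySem

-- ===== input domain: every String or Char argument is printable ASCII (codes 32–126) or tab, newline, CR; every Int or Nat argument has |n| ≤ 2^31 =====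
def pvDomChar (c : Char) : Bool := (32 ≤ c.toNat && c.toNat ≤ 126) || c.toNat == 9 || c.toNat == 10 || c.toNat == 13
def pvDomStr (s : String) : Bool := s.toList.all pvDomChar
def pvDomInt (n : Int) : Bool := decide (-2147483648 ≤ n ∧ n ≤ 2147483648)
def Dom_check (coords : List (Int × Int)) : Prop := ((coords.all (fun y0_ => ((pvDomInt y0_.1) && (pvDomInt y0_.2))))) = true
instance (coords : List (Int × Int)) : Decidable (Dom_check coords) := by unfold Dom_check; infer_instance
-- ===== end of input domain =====

-- B replaces A's four sorted==range(min,max+1) comparisons by one pass keeping running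
-- min/max and the distinct-value sets, testing contiguity as distinct-count = n ∧ max-min = n-1.

-- ===== PORT A =====
def check (coords : List (Int × Int)) : Bool :=
  let Xs := coords.map Prod.fst
  let Ys := coords.map Prod.snd
  if PySem.Set.len (PySem.Set.ofList Xs) == 1 &&
     (PySem.List.sorted Ys (fun y => y) ==
       PySem.List.pyRange ((PySem.List.min? Ys (fun y => y)).getD 0)
                          ((PySem.List.max? Ys (fun y => y)).getD 0 + 1) 1) then
    true
  else if PySem.Set.len (PySem.Set.ofList Ys) == 1 &&
     (PySem.List.sorted Xs (fun x => x) ==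
       PySem.List.pyRange ((PySem.List.min? Xs (fun x => x)).getD 0)
                          ((PySem.List.max? Xs (fun x => x)).getD 0 + 1) 1) then
    true
  else if PySem.Set.len (PySem.Set.ofList (coords.map (fun p => p.1 - p.2))) == 1 &&
     (PySem.List.sorted Xs (fun x => x) ==
       PySem.List.pyRange ((PySem.List.min? Xs (fun x => x)).getD 0)
                          ((PySem.List.max? Xs (fun x => x)).getD 0 + 1) 1) then
    true
  else if PySem.Set.len (PySem.Set.ofList (coords.map (fun p => p.1 + p.2))) == 1 &&
     (PySem.List.sorted Xs (fun x => x) ==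
       PySem.List.pyRange ((PySem.List.min? Xs (fun x => x)).getD 0)
                          ((PySem.List.max? Xs (fun x => x)).getD 0 + 1) 1) then
    true
  else
    false

-- ===== PORT B =====
-- the body of B's single for-loop
def bStep (st : Int × Int × Int × Int × PySem.Set Int × PySem.Set Int × PySem.Set Int × PySem.Set Int)
    (p : Int × Int) :
    Int × Int × Int × Int × PySem.Set Int × PySem.Set Int × PySem.Set Int × PySem.Set Int :=
  let (mnx, mxx, mny, mxy, xs, ys, ds, ss) := st
  (min mnx p.1, max mxx p.1, min mny p.2, max mxy p.2,
   PySem.Set.add xs p.1, PySem.Set.add ys p.2,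
   PySem.Set.add ds (p.1 - p.2), PySem.Set.add ss (p.1 + p.2))

def check_alt (coords : List (Int × Int)) : Bool :=
  match coords with
  | [] => false  -- Python B raises IndexError on coords[0] here; outside Pre_check
  | c :: _ =>
    let n : Int := (coords.length : Int)
    let st := coords.foldl bStep
      (c.1, c.1, c.2, c.2, PySem.Set.empty, PySem.Set.empty, PySem.Set.empty, PySem.Set.empty)
    let (mnx, mxx, mny, mxy, xs, ys, ds, ss) := st
    let contig_x := PySem.Set.len xs == n && mxx - mnx == n - 1
    let contig_y := PySem.Set.len ys == n && mxy - mny == n - 1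
    (PySem.Set.len xs == 1 && contig_y) ||
      ((PySem.Set.len ys == 1 || PySem.Set.len ds == 1 || PySem.Set.len ss == 1) && contig_x)

-- ===== PRECONDITION & SPEC =====
-- Pre_ excludes only the empty list, on which A raises ValueError (zip(*coords) unpacking fails).
def Pre_check (coords : List (Int × Int)) : Prop := coords ≠ []
instance (coords : List (Int × Int)) : Decidable (Pre_check coords) := by unfold Pre_check; infer_instance
def pvWitness_check : (List (Int × Int)) := [(0, 0), (1, 1)]

def Spec_check (coords : List (Int × Int)) (out : Bool) : Prop := out = check_alt coords
instance (coords : List (Int × Int)) (out : Bool) : Decidable (Spec_check coords out) := by unfold Spec_check; infer_instance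

-- ===== CLAIM (what is proved, stated in full; the proofs are below) =====
def Claim_equal_check : Prop := ∀ (coords : List (Int × Int)), Dom_check coords → Pre_check coords → Spec_check coords (check coords)

-- ===== LEMMAS AND PROOFS =====

-- Set.ofList keeps first occurrences: it is a sublist of its argument.
lemma foldl_add_sublist (xs : List Int) : ∀ (s : List Int),
    (xs.foldl PySem.Set.add s).Sublist (s ++ xs) := by
  induction xs with
  | nil => intro s; simp
  | cons x t ih =>
    intro s
    simp only [List.foldl_cons]
    have hcase : PySem.Set.add s x = s ∨ PySem.Set.add s x = s ++ [x] := by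
      unfold PySem.Set.add; split
      · exact Or.inl rfl
      · exact Or.inr rfl
    rcases hcase with h | h <;> rw [h]
    · exact (ih s).trans (by simp [List.Sublist.append_left (List.sublist_cons_self x t) s])
    · simpa using ih (s ++ [x])

lemma ofList_sublist (xs : List Int) : (PySem.Set.ofList xs).Sublist xs := by
  simpa [PySem.Set.ofList, PySem.Set.empty] using foldl_add_sublist xs []

lemma foldl_add_of_nodup (xs : List Int) : ∀ (s : List Int), (s ++ xs).Nodup →
    xs.foldl PySem.Set.add s = s ++ xs := by
  induction xs with
  | nil => intro s _; simp
  | cons x t ih =>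
    intro s hnd
    have hx : x ∉ s := by
      intro hmem
      exact (List.disjoint_of_nodup_append hnd) hmem (by simp)
    simp only [List.foldl_cons]
    have hadd : PySem.Set.add s x = s ++ [x] := by
      unfold PySem.Set.add
      simp [hx]
    rw [hadd, ih (s ++ [x]) (by simpa using hnd), List.append_assoc]
    simp

lemma ofList_eq_self_of_nodup (xs : List Int) (h : xs.Nodup) : PySem.Set.ofList xs = xs := by
  simpa [PySem.Set.ofList, PySem.Set.empty] using foldl_add_of_nodup xs [] (by simpa using h)

lemma nodup_iff_len (xs : List Int) : (PySem.Set.ofList xs).length = xs.length ↔ xs.Nodup := by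
  constructor
  · intro h
    have := (ofList_sublist xs).eq_of_length h
    rw [← this]; exact PySem.Set.nodup_ofList xs
  · intro h; rw [ofList_eq_self_of_nodup xs h]

-- the central fact: "sorted vs == range(min vs, max vs + 1)" ⟺ "all distinct ∧ max - min = len - 1"
lemma contig_iff (v : Int) (t : List Int) :
    PySem.List.sorted (v :: t) (fun y => y) =
      PySem.List.pyRange (t.foldl min v) (t.foldl max v + 1) 1
    ↔ (PySem.Set.ofList (v :: t)).length = (v :: t).length ∧
      t.foldl max v - t.foldl min v = (t.length : Int) := by
  set a := t.foldl min v with ha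
  set b := t.foldl max v with hb
  have hlo : ∀ x ∈ v :: t, a ≤ x := by
    intro x hx
    rcases List.mem_cons.mp hx with h | h
    · rw [h]; exact (PySem.List.foldl_min_le t v).1
    · exact (PySem.List.foldl_min_le t v).2 x h
  have hhi : ∀ x ∈ v :: t, x ≤ b := by
    intro x hx
    rcases List.mem_cons.mp hx with h | h
    · rw [h]; exact (PySem.List.le_foldl_max t v).1
    · exact (PySem.List.le_foldl_max t v).2 x h
  have hab : a ≤ b := le_trans (hlo v (by simp)) (hhi v (by simp))
  constructor
  · intro h
    have hperm : (PySem.List.pyRange a (b + 1) 1).Perm (v :: t) := by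
      rw [← h]; exact PySem.List.sorted_perm (v :: t) (fun y => y) false
    have hlen : (b + 1 - a).toNat = (v :: t).length := by
      simpa [PySem.List.length_pyRange_one] using hperm.length_eq
    have hnd : (v :: t).Nodup := hperm.nodup (PySem.List.nodup_pyRange_one a (b + 1))
    refine ⟨by rw [ofList_eq_self_of_nodup _ hnd], ?_⟩
    simp only [List.length_cons] at hlen
    omega
  · rintro ⟨h1, h2⟩
    have hnd : (v :: t).Nodup := (nodup_iff_len _).mp h1
    have hsub : (v :: t) ⊆ PySem.List.pyRange a (b + 1) 1 := by
      intro x hx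
      rw [PySem.List.mem_pyRange_one]
      exact ⟨hlo x hx, by have := hhi x hx; omega⟩
    have hsp : (v :: t).Subperm (PySem.List.pyRange a (b + 1) 1) := hnd.subperm hsub
    have hlen : (PySem.List.pyRange a (b + 1) 1).length ≤ (v :: t).length := by
      rw [PySem.List.length_pyRange_one]
      simp only [List.length_cons]
      omega
    have hperm : (PySem.List.pyRange a (b + 1) 1).Perm (v :: t) :=
      (hsp.perm_of_length_le hlen).symm
    exact PySem.List.sorted_eq_of_perm_of_pairwise_lt _ _ _ hperm
      (PySem.List.pairwise_lt_pyRange_one a (b + 1))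

-- B's loop, split into its eight independent component folds
lemma loopB (cs : List (Int × Int)) :
    ∀ (mnx mxx mny mxy : Int) (xs ys ds ss : PySem.Set Int),
    cs.foldl bStep (mnx, mxx, mny, mxy, xs, ys, ds, ss) =
      ((cs.map Prod.fst).foldl min mnx, (cs.map Prod.fst).foldl max mxx,
       (cs.map Prod.snd).foldl min mny, (cs.map Prod.snd).foldl max mxy,
       (cs.map Prod.fst).foldl PySem.Set.add xs, (cs.map Prod.snd).foldl PySem.Set.add ys,
       (cs.map (fun p => p.1 - p.2)).foldl PySem.Set.add ds,
       (cs.map (fun p => p.1 + p.2)).foldl PySem.Set.add ss) := by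
  induction cs with
  | nil => intro _ _ _ _ _ _ _ _; rfl
  | cons c t ih =>
    intro mnx mxx mny mxy xs ys ds ss
    simp only [List.foldl_cons, List.map_cons, bStep]
    exact ih _ _ _ _ _ _ _ _

-- the boolean shape of A's if-chain versus B's single expression
lemma bool_shape (p q r s cx cy : Bool) :
    (if p && cy then true else if q && cx then true else if r && cx then true
     else if s && cx then true else false) =
    ((p && cy) || ((q || r || s) && cx)) := by
  cases p <;> cases q <;> cases r <;> cases s <;> cases cx <;> cases cy <;> rfl

-- ===== VERDICT (by name: the statement is the Claim_ definition above) =====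
theorem check_spec : Claim_equal_check := by
  intro coords _ hpre
  unfold Spec_check
  match coords with
  | [] => exact absurd rfl hpre
  | c :: cs =>
    unfold check check_alt
    simp only [List.map_cons, List.foldl_cons, PySem.List.min?_id_cons,
      PySem.List.max?_id_cons, Option.getD_some]
    rw [show bStep (c.1, c.1, c.2, c.2, PySem.Set.empty, PySem.Set.empty, PySem.Set.empty,
          PySem.Set.empty) c =
        (c.1, c.1, c.2, c.2, PySem.Set.add PySem.Set.empty c.1, PySem.Set.add PySem.Set.empty c.2,
         PySem.Set.add PySem.Set.empty (c.1 - c.2), PySem.Set.add PySem.Set.empty (c.1 + c.2))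
      from by simp [bStep]]
    rw [loopB cs]
    have hofX : (cs.map Prod.fst).foldl PySem.Set.add (PySem.Set.add PySem.Set.empty c.1)
        = PySem.Set.ofList (c.1 :: cs.map Prod.fst) := rfl
    have hofY : (cs.map Prod.snd).foldl PySem.Set.add (PySem.Set.add PySem.Set.empty c.2)
        = PySem.Set.ofList (c.2 :: cs.map Prod.snd) := rfl
    have hofD : ((cs.map (fun p => p.1 - p.2)).foldl PySem.Set.add
          (PySem.Set.add PySem.Set.empty (c.1 - c.2)))
        = PySem.Set.ofList ((c.1 - c.2) :: cs.map (fun p => p.1 - p.2)) := rfl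
    have hofS : ((cs.map (fun p => p.1 + p.2)).foldl PySem.Set.add
          (PySem.Set.add PySem.Set.empty (c.1 + c.2)))
        = PySem.Set.ofList ((c.1 + c.2) :: cs.map (fun p => p.1 + p.2)) := rfl
    simp only [hofX, hofY, hofD, hofS]
    have hsX :
        (PySem.List.sorted (c.1 :: cs.map Prod.fst) (fun x => x) ==
          PySem.List.pyRange ((cs.map Prod.fst).foldl min c.1)
            ((cs.map Prod.fst).foldl max c.1 + 1) 1) =
        (PySem.Set.len (PySem.Set.ofList (c.1 :: cs.map Prod.fst)) == ((c :: cs).length : Int) &&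
          ((cs.map Prod.fst).foldl max c.1 - (cs.map Prod.fst).foldl min c.1 ==
            ((c :: cs).length : Int) - 1)) := by
      rw [Bool.eq_iff_iff]
      simp only [Bool.and_eq_true, beq_iff_eq]
      rw [contig_iff c.1 (cs.map Prod.fst)]
      unfold PySem.Set.len
      simp only [List.length_cons, List.length_map]
      constructor <;> rintro ⟨h1, h2⟩ <;> exact ⟨by omega, by omega⟩
    have hsY :
        (PySem.List.sorted (c.2 :: cs.map Prod.snd) (fun y => y) ==
          PySem.List.pyRange ((cs.map Prod.snd).foldl min c.2)
            ((cs.map Prod.snd).foldl max c.2 + 1) 1) =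
        (PySem.Set.len (PySem.Set.ofList (c.2 :: cs.map Prod.snd)) == ((c :: cs).length : Int) &&
          ((cs.map Prod.snd).foldl max c.2 - (cs.map Prod.snd).foldl min c.2 ==
            ((c :: cs).length : Int) - 1)) := by
      rw [Bool.eq_iff_iff]
      simp only [Bool.and_eq_true, beq_iff_eq]
      rw [contig_iff c.2 (cs.map Prod.snd)]
      unfold PySem.Set.len
      simp only [List.length_cons, List.length_map]
      constructor <;> rintro ⟨h1, h2⟩ <;> exact ⟨by omega, by omega⟩
    rw [hsX, hsY]
    exact bool_shape _ _ _ _ _ _
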